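-- pv_equiv track=rewrite | github.com/alsdk3586/study-algorithm | 3월-11월/10월/20211024/원준호/1.py | solution
-- ===== SOURCE A (Python) =====
-- def solution(answers):
--     N = len(answers)
--     answer_cnt = [0,0,0]
--
--     one = [1,2,3,4,5]
--     one_idx = 0
--     for i in range(N):
--         answer_cnt[0] += int(one[one_idx] == answers[i])
--         one_idx = (one_idx+1)%5
--
--     two = [1,3,4,5]
--     two_idx = 0
--     for i in range(N):
--         if i % 2 == 0:
--             answer_cnt[1] += int(2 == answers[i])
--         else:
--             answer_cnt[1] += int(two[two_idx] == answers[i])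
--             two_idx =  (two_idx+1)%4
--
--     three = [3,1,2,4,5]
--     three_idx = -1
--     for i in range(N):
--         if i % 2 == 0:
--             three_idx =  (three_idx+1)%5
--         answer_cnt[2] += int(three[three_idx] == answers[i])
--
--
--     answer = []
--     for idx, cnt in enumerate(answer_cnt, start=1):
--         if cnt == max(answer_cnt):
--             answer.append(idx)
--
--     return answer
-- ===== SOURCE B (Python) =====
-- def solution(answers):
--     p1 = [1, 2, 3, 4, 5]
--     p2 = [2, 1, 2, 3, 2, 4, 2, 5]
--     p3 = [3, 3, 1, 1, 2, 2, 4, 4, 5, 5]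
--     c1 = c2 = c3 = 0
--     for i, a in enumerate(answers):
--         c1 += a == p1[i % 5]
--         c2 += a == p2[i % 8]
--         c3 += a == p3[i % 10]
--     m = max(c1, c2, c3)
--     return [k for k, c in enumerate((c1, c2, c3), 1) if c == m]
-- ===== Notes on version B (the rewrite author's own statement) =====
-- stated objective: simpler
-- what changed: Replaces A's three separate loops with hand-maintained wrap-around pattern indices (and a stateful -1-initialised index bumped on even positions) by a single pass indexing three fixed cyclic tables at i%5, i%8, i%10, then a comprehension for the tied leaders.
import Mathlib
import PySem

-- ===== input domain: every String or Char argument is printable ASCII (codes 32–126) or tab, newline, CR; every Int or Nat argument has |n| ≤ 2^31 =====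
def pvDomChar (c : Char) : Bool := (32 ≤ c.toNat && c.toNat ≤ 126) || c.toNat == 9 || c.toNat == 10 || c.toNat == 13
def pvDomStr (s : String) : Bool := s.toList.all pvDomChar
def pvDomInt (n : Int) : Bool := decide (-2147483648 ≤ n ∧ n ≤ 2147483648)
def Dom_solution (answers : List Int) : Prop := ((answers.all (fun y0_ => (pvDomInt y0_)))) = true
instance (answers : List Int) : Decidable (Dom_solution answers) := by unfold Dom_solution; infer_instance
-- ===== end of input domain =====

-- B replaces A's three stateful-index loops by one pass over three fixed cyclic tables (i%5, i%8, i%10); simpler decomposition, same O(n) cost.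

-- ===== PORT A =====
def solution (answers : List Int) : List Int :=
  let N : Int := answers.length
  let one : List Int := [1,2,3,4,5]
  let s1 := (PySem.List.pyRange 0 N 1).foldl
    (fun (st : Int × Int) i =>
      (st.1 + (if PySem.List.pyGetD one st.2 0 = PySem.List.pyGetD answers i 0 then 1 else 0),
       PySem.Int.mod (st.2 + 1) 5)) (0, 0)
  let two : List Int := [1,3,4,5]
  let s2 := (PySem.List.pyRange 0 N 1).foldl
    (fun (st : Int × Int) i =>
      if PySem.Int.mod i 2 = 0 then
        (st.1 + (if (2 : Int) = PySem.List.pyGetD answers i 0 then 1 else 0), st.2)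
      else
        (st.1 + (if PySem.List.pyGetD two st.2 0 = PySem.List.pyGetD answers i 0 then 1 else 0),
         PySem.Int.mod (st.2 + 1) 4)) (0, 0)
  let three : List Int := [3,1,2,4,5]
  let s3 := (PySem.List.pyRange 0 N 1).foldl
    (fun (st : Int × Int) i =>
      let idx := if PySem.Int.mod i 2 = 0 then PySem.Int.mod (st.2 + 1) 5 else st.2
      (st.1 + (if PySem.List.pyGetD three idx 0 = PySem.List.pyGetD answers i 0 then 1 else 0),
       idx)) (0, -1)
  let cnt : List Int := [s1.1, s2.1, s3.1]
  (PySem.List.enumerate cnt 1).foldl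
    (fun acc p => if p.2 = (PySem.List.max? cnt (fun y => y)).getD 0 then acc ++ [p.1] else acc) []

-- ===== PORT B =====
def solution_alt (answers : List Int) : List Int :=
  let p1 : List Int := [1,2,3,4,5]
  let p2 : List Int := [2,1,2,3,2,4,2,5]
  let p3 : List Int := [3,3,1,1,2,2,4,4,5,5]
  let c := (PySem.List.enumerate answers 0).foldl
    (fun (c : Int × Int × Int) (p : Int × Int) =>
      (c.1 + (if p.2 = PySem.List.pyGetD p1 (PySem.Int.mod p.1 5) 0 then 1 else 0),
       c.2.1 + (if p.2 = PySem.List.pyGetD p2 (PySem.Int.mod p.1 8) 0 then 1 else 0),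
       c.2.2 + (if p.2 = PySem.List.pyGetD p3 (PySem.Int.mod p.1 10) 0 then 1 else 0)))
    ((0 : Int), (0 : Int), (0 : Int))
  let m := max c.1 (max c.2.1 c.2.2)
  ((PySem.List.enumerate [c.1, c.2.1, c.2.2] 1).filter (fun p => p.2 = m)).map (fun p => p.1)

-- ===== PRECONDITION & SPEC =====
def Spec_solution (answers : List Int) (out : List Int) : Prop := out = solution_alt answers
instance (answers : List Int) (out : List Int) : Decidable (Spec_solution answers out) := by unfold Spec_solution; infer_instance

-- ===== CLAIM (what is proved, stated in full; the proofs are below) =====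
def Claim_equal_solution : Prop := ∀ (answers : List Int), Dom_solution answers → Spec_solution answers (solution answers)

-- ===== LEMMAS AND PROOFS =====

-- expected answer of pattern j at 0-based position n (A's formulation)
def exp1 (n : Int) : Int := PySem.List.pyGetD [1,2,3,4,5] (n % 5) 0
def exp2 (n : Int) : Int := if n % 2 = 0 then 2 else PySem.List.pyGetD [1,3,4,5] ((n / 2) % 4) 0
def exp3 (n : Int) : Int := PySem.List.pyGetD [3,1,2,4,5] ((n / 2) % 5) 0

-- count of matches of xs (starting at position n) against pattern j
def S1 : List Int → Int → Int
  | [], _ => 0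
  | a :: t, n => (if a = exp1 n then 1 else 0) + S1 t (n + 1)
def S2 : List Int → Int → Int
  | [], _ => 0
  | a :: t, n => (if a = exp2 n then 1 else 0) + S2 t (n + 1)
def S3 : List Int → Int → Int
  | [], _ => 0
  | a :: t, n => (if a = exp3 n then 1 else 0) + S3 t (n + 1)

-- B's cyclic-table lookups agree with A-style expected answers
lemma b1 (n : Int) (_hn : 0 ≤ n) :
    PySem.List.pyGetD [1,2,3,4,5] (PySem.Int.mod n 5) 0 = exp1 n := by
  rw [PySem.Int.mod_eq_emod_of_pos (by omega)]; rfl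

lemma tab2 (r : Int) (h0 : 0 ≤ r) (h8 : r < 8) :
    PySem.List.pyGetD ([2,1,2,3,2,4,2,5] : List Int) r 0 =
      if r % 2 = 0 then 2 else PySem.List.pyGetD [1,3,4,5] (r / 2) 0 := by
  interval_cases r <;> decide

lemma b2 (n : Int) (_hn : 0 ≤ n) :
    PySem.List.pyGetD [2,1,2,3,2,4,2,5] (PySem.Int.mod n 8) 0 = exp2 n := by
  rw [PySem.Int.mod_eq_emod_of_pos (by omega)]
  have h := tab2 (n % 8) (by omega) (by omega)
  rw [show n % 8 % 2 = n % 2 from by omega, show n % 8 / 2 = n / 2 % 4 from by omega] at h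
  exact h

lemma tab3 (r : Int) (h0 : 0 ≤ r) (h10 : r < 10) :
    PySem.List.pyGetD ([3,3,1,1,2,2,4,4,5,5] : List Int) r 0 =
      PySem.List.pyGetD [3,1,2,4,5] (r / 2) 0 := by
  interval_cases r <;> decide

lemma b3 (n : Int) (_hn : 0 ≤ n) :
    PySem.List.pyGetD [3,3,1,1,2,2,4,4,5,5] (PySem.Int.mod n 10) 0 = exp3 n := by
  rw [PySem.Int.mod_eq_emod_of_pos (by omega)]
  have h := tab3 (n % 10) (by omega) (by omega)
  rw [show n % 10 / 2 = n / 2 % 5 from by omega] at h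
  exact h

-- B's single pass computes the three pattern counts
lemma foldB (t : List Int) (n : Int) (hn : 0 ≤ n) (c1 c2 c3 : Int) :
    (PySem.List.enumerate t n).foldl
      (fun (c : Int × Int × Int) (p : Int × Int) =>
        (c.1 + (if p.2 = PySem.List.pyGetD [1,2,3,4,5] (PySem.Int.mod p.1 5) 0 then 1 else 0),
         c.2.1 + (if p.2 = PySem.List.pyGetD [2,1,2,3,2,4,2,5] (PySem.Int.mod p.1 8) 0 then 1 else 0),
         c.2.2 + (if p.2 = PySem.List.pyGetD [3,3,1,1,2,2,4,4,5,5] (PySem.Int.mod p.1 10) 0 then 1 else 0)))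
      (c1, c2, c3)
    = (c1 + S1 t n, c2 + S2 t n, c3 + S3 t n) := by
  induction t generalizing n c1 c2 c3 with
  | nil => simp [PySem.List.enumerate_nil, S1, S2, S3]
  | cons a t ih =>
    rw [PySem.List.enumerate_cons, List.foldl_cons]
    simp only [b1 n hn, b2 n hn, b3 n hn]
    rw [ih (n + 1) (by omega)]
    simp [S1, S2, S3]; omega

-- the element at position n, read through drop
lemma getD_of_drop (xs t : List Int) (a : Int) (n : Nat) (h : xs.drop n = a :: t) :
    PySem.List.pyGetD xs (n : Int) 0 = a := by
  rw [PySem.List.pyGetD_natCast]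
  have hg : xs[n]? = some a := by
    have := @List.getElem?_drop Int xs n 0
    rw [h] at this; simpa using this.symm
  simp [List.getD, hg]

lemma drop_succ_of_drop (xs t : List Int) (a : Int) (n : Nat) (h : xs.drop n = a :: t) :
    xs.drop (n + 1) = t := by
  rw [← List.tail_drop, h, List.tail_cons]

lemma len_le_of_drop_nil (xs : List Int) (n : Nat) (h : xs.drop n = []) : xs.length ≤ n := by
  by_contra hc; push_neg at hc
  have := List.drop_eq_nil_iff.mp h; omega

-- A's first loop
lemma loopA1 (xs : List Int) : ∀ (t : List Int) (n : Nat) (c idx : Int),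
    xs.drop n = t → idx = (n : Int) % 5 →
    ((PySem.List.pyRange n xs.length 1).foldl
      (fun (st : Int × Int) i =>
        (st.1 + (if PySem.List.pyGetD [1,2,3,4,5] st.2 0 = PySem.List.pyGetD xs i 0 then 1 else 0),
         PySem.Int.mod (st.2 + 1) 5)) (c, idx)).1 = c + S1 t (n : Int) := by
  intro t
  induction t with
  | nil =>
    intro n c idx hd hi
    rw [PySem.List.pyRange_one_eq_nil (by exact_mod_cast len_le_of_drop_nil xs n hd)]
    simp [S1]
  | cons a t ih =>
    intro n c idx hd hi
    subst hi
    have hlt : n < xs.length := by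
      by_contra h; push_neg at h
      rw [List.drop_eq_nil_iff.mpr h] at hd; cases hd
    rw [PySem.List.pyRange_one_cons (by exact_mod_cast hlt), List.foldl_cons]
    simp only [getD_of_drop xs t a n hd]
    rw [PySem.Int.mod_eq_emod_of_pos (a := (n:Int) % 5 + 1) (b := 5) (by omega)]
    rw [show (if PySem.List.pyGetD [1,2,3,4,5] ((n:Int) % 5) 0 = a then (1:Int) else 0)
          = (if a = exp1 (n:Int) then (1:Int) else 0) from
        if_congr (by unfold exp1; exact eq_comm) rfl rfl]
    have hrec := ih (n + 1) (c + (if a = exp1 (n:Int) then 1 else 0)) (((n:Int) % 5 + 1) % 5)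
      (drop_succ_of_drop xs t a n hd) (by push_cast; omega)
    push_cast at hrec
    rw [hrec]
    simp only [S1]
    ring

-- A's second loop
lemma loopA2 (xs : List Int) : ∀ (t : List Int) (n : Nat) (c idx : Int),
    xs.drop n = t → idx = ((n : Int) / 2) % 4 →
    ((PySem.List.pyRange n xs.length 1).foldl
      (fun (st : Int × Int) i =>
        if PySem.Int.mod i 2 = 0 then
          (st.1 + (if (2 : Int) = PySem.List.pyGetD xs i 0 then 1 else 0), st.2)
        else
          (st.1 + (if PySem.List.pyGetD [1,3,4,5] st.2 0 = PySem.List.pyGetD xs i 0 then 1 else 0),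
           PySem.Int.mod (st.2 + 1) 4)) (c, idx)).1 = c + S2 t (n : Int) := by
  intro t
  induction t with
  | nil =>
    intro n c idx hd hi
    rw [PySem.List.pyRange_one_eq_nil (by exact_mod_cast len_le_of_drop_nil xs n hd)]
    simp [S2]
  | cons a t ih =>
    intro n c idx hd hi
    subst hi
    have hlt : n < xs.length := by
      by_contra h; push_neg at h
      rw [List.drop_eq_nil_iff.mpr h] at hd; cases hd
    rw [PySem.List.pyRange_one_cons (by exact_mod_cast hlt), List.foldl_cons]
    simp only [getD_of_drop xs t a n hd]
    rw [PySem.Int.mod_eq_emod_of_pos (a := (n:Int)) (b := 2) (by omega)]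
    by_cases hpar : (n : Int) % 2 = 0
    · rw [if_pos hpar]
      rw [show (if (2:Int) = a then (1:Int) else 0)
            = (if a = exp2 (n:Int) then (1:Int) else 0) from
          if_congr (by unfold exp2; rw [if_pos hpar]; exact eq_comm) rfl rfl]
      have hrec := ih (n + 1) (c + (if a = exp2 (n:Int) then 1 else 0)) ((n:Int) / 2 % 4)
        (drop_succ_of_drop xs t a n hd) (by push_cast; omega)
      push_cast at hrec
      rw [hrec]
      simp only [S2]
      ring
    · rw [if_neg hpar]
      rw [PySem.Int.mod_eq_emod_of_pos (a := (n:Int) / 2 % 4 + 1) (b := 4) (by omega)]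
      rw [show (if PySem.List.pyGetD [1,3,4,5] ((n:Int) / 2 % 4) 0 = a then (1:Int) else 0)
            = (if a = exp2 (n:Int) then (1:Int) else 0) from
          if_congr (by unfold exp2; rw [if_neg hpar]; exact eq_comm) rfl rfl]
      have hrec := ih (n + 1) (c + (if a = exp2 (n:Int) then 1 else 0)) (((n:Int) / 2 % 4 + 1) % 4)
        (drop_succ_of_drop xs t a n hd) (by push_cast; omega)
      push_cast at hrec
      rw [hrec]
      simp only [S2]
      ring

-- A's third loop (index starts at -1, bumped on even positions)
lemma loopA3 (xs : List Int) : ∀ (t : List Int) (n : Nat) (c idx : Int),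
    xs.drop n = t → idx = (if (n : Int) = 0 then (-1 : Int) else (((n : Int) - 1) / 2) % 5) →
    ((PySem.List.pyRange n xs.length 1).foldl
      (fun (st : Int × Int) i =>
        let idx := if PySem.Int.mod i 2 = 0 then PySem.Int.mod (st.2 + 1) 5 else st.2
        (st.1 + (if PySem.List.pyGetD [3,1,2,4,5] idx 0 = PySem.List.pyGetD xs i 0 then 1 else 0),
         idx)) (c, idx)).1 = c + S3 t (n : Int) := by
  intro t
  induction t with
  | nil =>
    intro n c idx hd hi
    rw [PySem.List.pyRange_one_eq_nil (by exact_mod_cast len_le_of_drop_nil xs n hd)]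
    simp [S3]
  | cons a t ih =>
    intro n c idx hd hi
    subst hi
    have hlt : n < xs.length := by
      by_contra h; push_neg at h
      rw [List.drop_eq_nil_iff.mpr h] at hd; cases hd
    have hn0 : (0 : Int) ≤ (n : Int) := Int.natCast_nonneg n
    rw [PySem.List.pyRange_one_cons (by exact_mod_cast hlt), List.foldl_cons]
    simp only [getD_of_drop xs t a n hd]
    rw [PySem.Int.mod_eq_emod_of_pos (a := (n:Int)) (b := 2) (by omega)]
    have hused : (if (n : Int) % 2 = 0 then
          PySem.Int.mod ((if (n : Int) = 0 then (-1 : Int) else (((n : Int) - 1) / 2) % 5) + 1) 5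
        else (if (n : Int) = 0 then (-1 : Int) else (((n : Int) - 1) / 2) % 5))
        = ((n : Int) / 2) % 5 := by
      by_cases hpar : (n : Int) % 2 = 0
      · rw [if_pos hpar, PySem.Int.mod_eq_emod_of_pos (by omega)]
        by_cases h0 : (n : Int) = 0
        · rw [if_pos h0, h0]; decide
        · rw [if_neg h0]; omega
      · rw [if_neg hpar, if_neg (by omega)]; omega
    rw [hused]
    rw [show (if PySem.List.pyGetD [3,1,2,4,5] ((n:Int) / 2 % 5) 0 = a then (1:Int) else 0)
          = (if a = exp3 (n:Int) then (1:Int) else 0) from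
        if_congr (by unfold exp3; exact eq_comm) rfl rfl]
    have hrec := ih (n + 1) (c + (if a = exp3 (n:Int) then 1 else 0)) ((n:Int) / 2 % 5)
      (drop_succ_of_drop xs t a n hd)
      (by rw [if_neg (by push_cast; omega)]; push_cast; omega)
    push_cast at hrec
    rw [hrec]
    simp only [S3]
    ring

-- selection loop: append-fold = filter-map
lemma sel_fold (l : List (Int × Int)) (m : Int) (acc : List Int) :
    l.foldl (fun acc p => if p.2 = m then acc ++ [p.1] else acc) acc
      = acc ++ (l.filter (fun p => p.2 = m)).map (fun p => p.1) := by
  induction l generalizing acc with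
  | nil => simp
  | cons x l ih => simp only [List.foldl_cons, List.filter_cons]; split_ifs <;> simp_all

-- max(list) = nested binary max
lemma max_list (a b c : Int) :
    (PySem.List.max? [a, b, c] (fun y => y)).getD 0 = max a (max b c) := by
  rw [PySem.List.max?_id_cons]
  simp [List.foldl, max_assoc]

theorem solution_spec : Claim_equal_solution := by
  unfold Claim_equal_solution
  intro answers _
  unfold Spec_solution solution solution_alt
  simp only
  have h1 := loopA1 answers answers 0 0 0 (by simp) (by simp)
  have h2 := loopA2 answers answers 0 0 0 (by simp) (by simp)
  have h3 := loopA3 answers answers 0 0 (-1) (by simp) (by simp)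
  simp only [Nat.cast_zero] at h1 h2 h3
  rw [h1, h2, h3, foldB answers 0 (by omega) 0 0 0]
  simp only [zero_add]
  rw [sel_fold, max_list]
  simp
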